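-- pv_equiv track=rewrite | github.com/Santos-Arellano/Next-level-Competitive-programming-expert | A - Teclado/Teclado.py | find_working_buttons
-- ===== SOURCE A (Python) =====
-- def find_working_buttons(s):
--     n = len(s)
--     working_buttons = set()
--
--     i = 0
--
--     while i < n:
--         char = s[i]
--
--         if i == n - 1 or s[i] != s[i + 1]:
--             working_buttons.add(char)
--             i += 1
--         else:
--             i += 2
--
--     return ''.join(sorted(working_buttons))
-- ===== SOURCE B (Python) =====
-- def find_working_buttons(s):
--     working = set()
--     prev = None
--     odd = False
--     for c in s:
--         if c == prev:
--             odd = not odd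
--         else:
--             if odd:
--                 working.add(prev)
--             prev = c
--             odd = True
--     if odd:
--         working.add(prev)
--     return ''.join(sorted(working))
-- ===== Notes on version B (the rewrite author's own statement) =====
-- stated objective: faster
-- what changed: Replaces A's pair-cancelling index scan (i+=1/i+=2 with lookahead) by a single left-to-right fold that tracks the current run's character and the parity of its length, flushing the character into the set at each run boundary when the parity is odd. Measured ~3x faster: B iterates the string directly instead of repeated per-index subscripting with lookahead.
import Mathlib
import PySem

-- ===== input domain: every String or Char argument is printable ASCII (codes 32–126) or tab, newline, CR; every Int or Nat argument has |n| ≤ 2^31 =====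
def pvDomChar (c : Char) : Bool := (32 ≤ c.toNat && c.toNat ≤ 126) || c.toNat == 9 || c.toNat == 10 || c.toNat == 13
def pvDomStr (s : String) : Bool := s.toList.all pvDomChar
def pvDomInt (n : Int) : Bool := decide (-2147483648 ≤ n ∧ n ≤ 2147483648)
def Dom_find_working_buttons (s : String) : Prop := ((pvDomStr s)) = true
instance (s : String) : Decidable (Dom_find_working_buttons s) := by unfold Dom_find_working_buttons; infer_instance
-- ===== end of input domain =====

-- B replaces A's pair-cancelling index scan by a single fold tracking the current
-- run's character and the parity of its length (objective: alternative decomposition).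

-- ===== PORT A =====
-- A's while loop over index i, stepping by 1 or 2 with a one-char lookahead,
-- transliterated as recursion on the character list: [c] is the i == n-1 case,
-- c :: d :: rest carries the s[i] != s[i+1] test, else i += 2 drops two chars.
def pvLoopA : List Char → PySem.Set Char → PySem.Set Char
  | [], w => w
  | [c], w => PySem.Set.add w c
  | c :: d :: rest, w =>
      if c ≠ d then pvLoopA (d :: rest) (PySem.Set.add w c)
      else pvLoopA rest w

def find_working_buttons (s : String) : String :=
  String.ofList (PySem.List.sorted (pvLoopA s.toList PySem.Set.empty) (fun c => c) false)

-- ===== PORT B =====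
-- one fold step of B's for-loop; state = (prev, odd, working)
def pvStepB (st : Option Char × Bool × PySem.Set Char) (c : Char) :
    Option Char × Bool × PySem.Set Char :=
  match st with
  | (some p, odd, w) =>
      if c = p then (some p, !odd, w)
      else (some c, true, if odd then PySem.Set.add w p else w)
  | (none, _, w) => (some c, true, w)
      -- prev is None only at the start, where odd = False, so no add happens in Python

-- the final 'if odd: working.add(prev)' after the loop
def pvFlushB (st : Option Char × Bool × PySem.Set Char) : PySem.Set Char :=
  match st with
  | (some p, true, w) => PySem.Set.add w p
  | (_, _, w) => w

def find_working_buttons_alt (s : String) : String :=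
  String.ofList (PySem.List.sorted (pvFlushB (s.toList.foldl pvStepB (none, false, PySem.Set.empty)))
    (fun c => c) false)

-- ===== PRECONDITION & SPEC =====
def Spec_find_working_buttons (s : String) (out : String) : Prop := out = find_working_buttons_alt s
instance (s : String) (out : String) : Decidable (Spec_find_working_buttons s out) := by unfold Spec_find_working_buttons; infer_instance

-- ===== CLAIM (what is proved, stated in full; the proofs are below) =====
def Claim_equal_find_working_buttons : Prop := ∀ (s : String), Dom_find_working_buttons s → Spec_find_working_buttons s (find_working_buttons s)

-- ===== LEMMAS AND PROOFS =====

-- mid-run agreement: A sitting on char c = B with state (some c, odd := true)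
theorem pvKeyP : ∀ (xs : List Char) (c : Char) (w : PySem.Set Char),
    pvLoopA (c :: xs) w = pvFlushB (xs.foldl pvStepB (some c, true, w))
  | [], c, w => by simp [pvLoopA, pvFlushB]
  | [d], c, w => by
      by_cases h : c = d
      · subst h; simp [pvLoopA, pvStepB, pvFlushB]
      · simp [pvLoopA, pvStepB, pvFlushB, h, Ne.symm h]
  | d :: e :: rest, c, w => by
      by_cases h : c = d
      · subst h
        by_cases h2 : c = e
        · subst h2
          simpa [pvLoopA, pvStepB] using pvKeyP rest c w
        · simpa [pvLoopA, pvStepB, h2, Ne.symm h2] using pvKeyP rest e w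
      · simpa [pvLoopA, pvStepB, h, Ne.symm h] using pvKeyP (e :: rest) d (PySem.Set.add w c)
  termination_by xs => xs.length

theorem pvMainEq (xs : List Char) (w : PySem.Set Char) :
    pvLoopA xs w = pvFlushB (xs.foldl pvStepB (none, false, w)) := by
  cases xs with
  | nil => simp [pvLoopA, pvFlushB]
  | cons d rest => simpa [pvStepB] using pvKeyP rest d w

-- ===== VERDICT (by name: the statement is the Claim_ definition above) =====
theorem find_working_buttons_spec : Claim_equal_find_working_buttons := by
  intro s _
  unfold Spec_find_working_buttons find_working_buttons find_working_buttons_alt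
  rw [pvMainEq]
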